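-- pv_equiv track=rewrite | github.com/Ogaday/pairup | pairup/pairup.py | pairs
-- ===== SOURCE A (Python) =====
-- from itertools import islice
-- from typing import Iterator, Optional, Sequence, TypeVar
--
-- T = TypeVar("T")
--
-- def pairs(seq: Sequence[T]) -> Iterator[tuple[T, ...]]:
--     """Yield pairs from a sequence.
--
--     Example:
--     >>> tuple(pairs("ABCDEFG"))
--     (('A', 'B'), ('C', 'D'), ('E', 'F'), ('G',))
--     """
--     gen = iter(seq)
--     while True:
--         batch = tuple(islice(gen, 2))
--         if len(batch):
--             yield batch
--         else:
--             break
-- ===== SOURCE B (Python) =====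
-- def pairs(seq):
--     """Yield pairs from a sequence by indexed slicing (idiomatic; no iterator draining)."""
--     for i in range(0, len(seq), 2):
--         yield tuple(seq[i:i + 2])
-- ===== Notes on version B (the rewrite author's own statement) =====
-- stated objective: idiomatic
-- what changed: Replaces the infinite while-loop draining an iterator with islice by a single for over range(0, len(seq), 2) yielding tuple(seq[i:i+2]).
import Mathlib
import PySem

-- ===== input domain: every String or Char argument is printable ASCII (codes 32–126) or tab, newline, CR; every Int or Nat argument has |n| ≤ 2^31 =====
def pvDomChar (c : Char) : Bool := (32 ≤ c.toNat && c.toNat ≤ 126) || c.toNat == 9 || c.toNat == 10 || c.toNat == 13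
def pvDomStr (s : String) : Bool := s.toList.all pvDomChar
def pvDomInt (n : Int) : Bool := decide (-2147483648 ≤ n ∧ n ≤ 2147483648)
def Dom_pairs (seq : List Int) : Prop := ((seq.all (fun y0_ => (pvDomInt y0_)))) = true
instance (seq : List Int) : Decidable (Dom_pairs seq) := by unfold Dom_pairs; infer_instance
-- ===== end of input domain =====

-- B replaces A's iterator-draining while-loop by a single indexed loop over range(0, len, 2)
-- with slicing (idiomatic; same cost). Generators are ported as the list of yielded values.

-- ===== PORT A =====
-- A drains an iterator two at a time: batch = tuple(islice(gen, 2)); yield while non-empty.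
def pairs (seq : List Int) : List (List Int) :=
  match seq with
  | [] => []                        -- batch empty: break
  | [a] => [[a]]                    -- batch = (a,): yield, next batch empty
  | a :: b :: rest => [a, b] :: pairs rest  -- batch = (a,b): yield, continue

-- ===== PORT B =====
-- for i in range(0, len(seq), 2): yield tuple(seq[i:i+2])
def pairs_alt (seq : List Int) : List (List Int) :=
  (PySem.List.pyRange 0 (seq.length : Int) 2).map
    (fun i => PySem.List.slice seq (some i) (some (i + 2)))

-- ===== PRECONDITION & SPEC =====
def Spec_pairs (seq : List Int) (out : List (List Int)) : Prop := out = pairs_alt seq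
instance (seq : List Int) (out : List (List Int)) : Decidable (Spec_pairs seq out) := by unfold Spec_pairs; infer_instance

-- ===== CLAIM (what is proved, stated in full; the proofs are below) =====
def Claim_equal_pairs : Prop := ∀ (seq : List Int), Dom_pairs seq → Spec_pairs seq (pairs seq)

-- ===== LEMMAS AND PROOFS =====

-- nat-indexed reformulation of B
def pairsChunks (seq : List Int) : List (List Int) :=
  (List.range ((seq.length + 1) / 2)).map (fun k => (seq.drop (2 * k)).take 2)

lemma pairs_eq_chunks (seq : List Int) : pairs seq = pairsChunks seq := by
  fun_induction pairs seq with
  | case1 => rfl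
  | case2 a => simp [pairsChunks]
  | case3 a b rest ih =>
    simp only [ih, pairsChunks]
    have hlen : ((a :: b :: rest).length + 1) / 2 = (rest.length + 1) / 2 + 1 := by
      simp only [List.length_cons]; omega
    rw [hlen, List.range_succ_eq_map]
    simp only [List.map_cons, List.map_map]
    rfl

lemma alt_eq_chunks (seq : List Int) : pairs_alt seq = pairsChunks seq := by
  unfold pairs_alt pairsChunks
  rw [PySem.List.pyRange_of_pos 0 (seq.length : Int) (by norm_num)]
  rw [List.map_map]
  rcases Nat.eq_zero_or_pos seq.length with h | h
  · simp [h]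
  · have hif : (if (0:Int) < (seq.length : Int) then
        (((seq.length : Int) - 0 + 2 - 1) / 2).toNat else 0) = (seq.length + 1) / 2 := by
      rw [if_pos (by exact_mod_cast h)]
      omega
    rw [hif]
    apply List.map_congr_left
    intro k _
    simp only [Function.comp_apply, zero_add]
    have h1 : (2 : Int) * (k : Int) = ((2 * k : Nat) : Int) := by push_cast; ring
    have h2 : ((2 * k : Nat) : Int) + 2 = ((2 * k : Nat) : Int) + ((2 : Nat) : Int) := by norm_num
    rw [h1, h2, PySem.List.slice_natCast_add]

-- ===== VERDICT (by name: the statement is the Claim_ definition above) =====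
theorem pairs_spec : Claim_equal_pairs := by
  intro seq _
  unfold Spec_pairs
  rw [pairs_eq_chunks, alt_eq_chunks]
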